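-- pv_equiv track=rewrite | github.com/dariakryvosheieva/agent-psychometrics | experiment_b/shared/data_splits.py | split_agents_by_dates
-- ===== SOURCE A (Python) =====
-- from typing import Dict, List, Set, Tuple
--
-- def split_agents_by_dates(
--     agents: List[str],
--     agent_dates: Dict[str, str],
--     cutoff_date: str,
-- ) -> Tuple[List[str], List[str]]:
--     """Split agents into pre-frontier and post-frontier by date cutoff.
--
--     This is a generic function that works with any source of agent dates
--     (e.g., from agent name prefix for SWE-bench, or from metadata for TerminalBench).
--
--     Args:
--         agents: List of agent names
--         agent_dates: Dict mapping agent_id -> date string (YYYYMMDD format)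
--         cutoff_date: Date string in YYYYMMDD format. Agents with date >= cutoff
--                      are post-frontier, agents with date < cutoff are pre-frontier.
--
--     Returns:
--         Tuple of (pre_frontier_agents, post_frontier_agents)
--
--     Raises:
--         ValueError: If any agent is missing a date in agent_dates
--     """
--     pre_frontier = []
--     post_frontier = []
--     missing_dates = []
--
--     for agent in agents:
--         date = agent_dates.get(agent)
--         if not date:
--             missing_dates.append(agent)
--             continue
--
--         if date >= cutoff_date:
--             post_frontier.append(agent)
--         else:
--             pre_frontier.append(agent)
--
--     if missing_dates:
--         raise ValueError(
--             f"{len(missing_dates)} agents missing dates. "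
--             f"First 5: {missing_dates[:5]}"
--         )
--
--     return pre_frontier, post_frontier
-- ===== SOURCE B (Python) =====
-- def split_agents_by_dates(agents, agent_dates, cutoff_date):
--     missing_dates = [a for a in agents if not agent_dates.get(a)]
--     if missing_dates:
--         raise ValueError(
--             f"{len(missing_dates)} agents missing dates. "
--             f"First 5: {missing_dates[:5]}"
--         )
--     pre_frontier = [a for a in agents if agent_dates[a] < cutoff_date]
--     post_frontier = [a for a in agents if agent_dates[a] >= cutoff_date]
--     return pre_frontier, post_frontier
-- ===== Notes on version B (the rewrite author's own statement) =====
-- stated objective: simpler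
-- what changed: Replaces the single interleaved accumulate-three-lists loop with a validate-first pass (raising the identical ValueError) followed by two independent partition comprehensions over agents.
import Mathlib
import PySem

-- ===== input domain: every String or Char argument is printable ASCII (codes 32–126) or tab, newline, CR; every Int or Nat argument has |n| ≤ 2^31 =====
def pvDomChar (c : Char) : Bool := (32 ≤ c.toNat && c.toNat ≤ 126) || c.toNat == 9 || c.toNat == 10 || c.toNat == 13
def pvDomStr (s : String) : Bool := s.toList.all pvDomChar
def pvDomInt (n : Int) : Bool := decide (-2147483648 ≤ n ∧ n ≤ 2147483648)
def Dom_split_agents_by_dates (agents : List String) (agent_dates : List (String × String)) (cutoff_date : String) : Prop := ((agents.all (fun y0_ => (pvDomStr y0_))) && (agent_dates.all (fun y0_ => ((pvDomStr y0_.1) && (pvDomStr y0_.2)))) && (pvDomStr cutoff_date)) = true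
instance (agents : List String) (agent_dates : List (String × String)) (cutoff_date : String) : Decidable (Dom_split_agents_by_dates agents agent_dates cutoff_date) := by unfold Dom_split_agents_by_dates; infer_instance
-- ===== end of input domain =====

-- B replaces A's single interleaved three-accumulator loop by a validate-first pass
-- followed by two independent partition comprehensions (objective: simpler).

-- ===== PORT A =====
-- A's for-loop: one pass accumulating pre_frontier, post_frontier, missing_dates.
def splitLoopA (agent_dates : List (String × String)) (cutoff_date : String) :
    List String → List String → List String → List String →
    List String × List String × List String
  | [], pre, post, missing => (pre, post, missing)
  | agent :: rest, pre, post, missing =>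
    match agent_dates.lookup agent with
    | none => splitLoopA agent_dates cutoff_date rest pre post (missing ++ [agent])
    | some date =>
      if date = "" then splitLoopA agent_dates cutoff_date rest pre post (missing ++ [agent])
      else if cutoff_date ≤ date then
        splitLoopA agent_dates cutoff_date rest pre (post ++ [agent]) missing
      else
        splitLoopA agent_dates cutoff_date rest (pre ++ [agent]) post missing

def split_agents_by_dates (agents : List String) (agent_dates : List (String × String)) (cutoff_date : String) : List String × List String :=
  let r := splitLoopA agent_dates cutoff_date agents [] [] []
  -- if r.2.2 (missing_dates) is nonempty Python raises ValueError: excluded by Pre_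
  (r.1, r.2.1)

-- ===== PORT B =====
def split_agents_by_dates_alt (agents : List String) (agent_dates : List (String × String)) (cutoff_date : String) : List String × List String :=
  let missing := agents.filter (fun a => ((agent_dates.lookup a).getD "") == "")
  if missing.isEmpty then
    (agents.filter (fun a => decide (((agent_dates.lookup a).getD "") < cutoff_date)),
     agents.filter (fun a => decide (cutoff_date ≤ ((agent_dates.lookup a).getD ""))))
  else ([], [])  -- Python raises ValueError here: excluded by Pre_

-- ===== PRECONDITION & SPEC =====
-- Pre_ excludes exactly the inputs where some agent has no date (or an empty-string
-- date, falsy in Python), on which both A and B raise ValueError.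
def Pre_split_agents_by_dates (agents : List String) (agent_dates : List (String × String)) (cutoff_date : String) : Prop :=
  ∀ a ∈ agents, ((agent_dates.lookup a).getD "") ≠ ""
instance (agents : List String) (agent_dates : List (String × String)) (cutoff_date : String) : Decidable (Pre_split_agents_by_dates agents agent_dates cutoff_date) := by unfold Pre_split_agents_by_dates; infer_instance

def pvWitness_split_agents_by_dates : List String × (List (String × String)) × String :=
  (["a", "b"], [("a", "20240101"), ("b", "20220101")], "20230101")

def Spec_split_agents_by_dates (agents : List String) (agent_dates : List (String × String)) (cutoff_date : String) (out : List String × List String) : Prop := out = split_agents_by_dates_alt agents agent_dates cutoff_date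
instance (agents : List String) (agent_dates : List (String × String)) (cutoff_date : String) (out : List String × List String) : Decidable (Spec_split_agents_by_dates agents agent_dates cutoff_date out) := by unfold Spec_split_agents_by_dates; infer_instance

-- ===== CLAIM (what is proved, stated in full; the proofs are below) =====
def Claim_equal_split_agents_by_dates : Prop := ∀ (agents : List String) (agent_dates : List (String × String)) (cutoff_date : String), Dom_split_agents_by_dates agents agent_dates cutoff_date → Pre_split_agents_by_dates agents agent_dates cutoff_date → Spec_split_agents_by_dates agents agent_dates cutoff_date (split_agents_by_dates agents agent_dates cutoff_date)

-- ===== LEMMAS AND PROOFS =====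

-- Loop invariant: with every agent's date present and nonempty, A's loop appends
-- exactly B's two filters to the accumulators and never touches `missing`.
lemma splitLoopA_eq (ad : List (String × String)) (cut : String)
    (agents pre post missing : List String)
    (h : ∀ a ∈ agents, ((ad.lookup a).getD "") ≠ "") :
    splitLoopA ad cut agents pre post missing =
      (pre ++ agents.filter (fun a => decide (((ad.lookup a).getD "") < cut)),
       post ++ agents.filter (fun a => decide (cut ≤ ((ad.lookup a).getD ""))),
       missing) := by
  induction agents generalizing pre post missing with
  | nil => simp [splitLoopA]
  | cons a rest ih =>
    have ha : ((ad.lookup a).getD "") ≠ "" := h a (by simp)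
    have hrest : ∀ x ∈ rest, ((ad.lookup x).getD "") ≠ "" :=
      fun x hx => h x (by simp [hx])
    cases hl : ad.lookup a with
    | none => simp [hl] at ha
    | some d =>
      rw [hl] at ha
      simp only [Option.getD] at ha
      by_cases hc : cut ≤ d
      · have hc' : cut.toList ≤ d.toList := String.le_iff_toList_le.mp hc
        have hnl : ¬ d.toList < cut.toList := not_lt.mpr hc'
        simp [splitLoopA, hl, ha, hc, hc', hnl, ih _ _ _ hrest]
      · have hlt : d.toList < cut.toList := String.lt_iff_toList_lt.mp (not_le.mp hc)
        have hnc : ¬ cut.toList ≤ d.toList := not_le.mpr hlt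
        simp [splitLoopA, hl, ha, hc, hlt, hnc, ih _ _ _ hrest]

-- ===== VERDICT (by name: the statement is the Claim_ definition above) =====
theorem split_agents_by_dates_spec : Claim_equal_split_agents_by_dates := by
  intro agents ad cut _ hpre
  unfold Spec_split_agents_by_dates split_agents_by_dates split_agents_by_dates_alt
  have hm : agents.filter (fun a => ((ad.lookup a).getD "") == "") = [] := by
    rw [List.filter_eq_nil_iff]
    intro a hamem
    simpa using hpre a hamem
  rw [splitLoopA_eq ad cut agents [] [] [] hpre]
  simp [hm]
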